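-- pv_equiv track=rewrite | github.com/shadabsk/interview-oriented-python-dsa-oop-prep | 25_bitonic_sequence/bitonic_seq_dsa_solution.py | generate_bitonic_sequence
-- ===== SOURCE A (Python) =====
-- def generate_bitonic_sequence(input_list):
--     stack = []
--     result_list = []
--     p_set = set()
--
--     for idx, cur_elem in enumerate(input_list):
--         if idx in p_set:
--             continue
--
--         # incrementing sequence
--         if stack and cur_elem >= stack[-1]:
--             stack.append(cur_elem)
--             p_set.add(idx)
--         else:
--             stack.append(cur_elem)
--             p_set.add(idx)
--
--             inner_list = input_list[idx+1:]
--             c_idx = idx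
--
--             for i_val in inner_list:
--                 # decrementing sequence
--                 if i_val <= stack[-1]:
--                     c_idx += 1
--                     p_set.add(c_idx)
--                     stack.append(i_val)
--                 else:
--                     break
--
--             result_list.append(stack)
--             stack = [input_list[c_idx]]
--
--     if stack and stack not in result_list:
--         result_list.append(stack)
--     return result_list
-- ===== SOURCE B (Python) =====
-- def generate_bitonic_sequence(input_list):
--     n = len(input_list)
--     if n == 0:
--         return []
--     # Stage 1: one linear scan over adjacent pairs with a direction flag,
--     # recording only the index where each descending run bottoms out.
--     ends = []
--     descending = True
--     for i in range(1, n):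
--         if descending:
--             if input_list[i] > input_list[i - 1]:
--                 ends.append(i - 1)
--                 descending = False
--         elif input_list[i] < input_list[i - 1]:
--             descending = True
--     if descending:
--         ends.append(n - 1)
--     # Stage 2: materialise the segments from the recorded boundary indices.
--     segments = [input_list[s:e + 1] for s, e in zip([0] + ends, ends)]
--     tail = [input_list[n - 1]] if descending else input_list[ends[-1]:]
--     if tail not in segments:
--         segments.append(tail)
--     return segments
-- ===== Notes on version B (the rewrite author's own statement) =====
-- stated objective: faster
-- what changed: B is a two-stage algorithm: one linear scan with a direction flag records only the bottom index of each descending run, then the segments are materialised by slicing at those boundary indices; A instead simulates a stack with a processed-index set, copies input_list[idx+1:] for every segment and appends element by element.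
import Mathlib
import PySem

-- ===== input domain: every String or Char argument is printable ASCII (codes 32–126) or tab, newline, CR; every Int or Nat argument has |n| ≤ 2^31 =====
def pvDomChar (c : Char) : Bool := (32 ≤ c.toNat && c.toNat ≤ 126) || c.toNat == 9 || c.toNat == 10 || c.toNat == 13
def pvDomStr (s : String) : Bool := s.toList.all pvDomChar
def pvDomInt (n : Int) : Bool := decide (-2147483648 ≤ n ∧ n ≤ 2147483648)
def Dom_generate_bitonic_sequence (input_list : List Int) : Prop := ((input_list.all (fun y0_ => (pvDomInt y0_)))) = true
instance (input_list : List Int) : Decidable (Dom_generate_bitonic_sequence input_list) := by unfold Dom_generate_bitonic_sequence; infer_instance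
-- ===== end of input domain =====

-- B is a two-stage algorithm (one boundary-recording scan with a direction flag, then slicing
-- at the recorded indices) replacing A's stack simulation with a processed-index set; same value.

-- ===== PORT A =====
-- inner 'for i_val in inner_list: … else break' loop of A (stack is nonempty at every call site,
-- so stack[-1] is ported as getLastD 0)
def pvInnerA : List Int → Int → List Int → PySem.Set Int → Int × List Int × PySem.Set Int
  | [], c_idx, stack, pset => (c_idx, stack, pset)
  | i_val :: rest, c_idx, stack, pset =>
    if i_val ≤ stack.getLastD 0 then
      pvInnerA rest (c_idx + 1) (stack ++ [i_val]) (PySem.Set.add pset (c_idx + 1))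
    else (c_idx, stack, pset)

-- one iteration of A's 'for idx, cur_elem in enumerate(input_list)' body
def pvStepA (input_list : List Int) :
    List Int × List (List Int) × PySem.Set Int → Int × Int →
    List Int × List (List Int) × PySem.Set Int
  | (stack, result_list, pset), (idx, cur) =>
    if PySem.Set.contains pset idx then (stack, result_list, pset)
    else if stack ≠ [] ∧ stack.getLastD 0 ≤ cur then
      (stack ++ [cur], result_list, PySem.Set.add pset idx)
    else
      let stack1 := stack ++ [cur]
      let pset1 := PySem.Set.add pset idx
      let inner := PySem.List.slice input_list (some (idx + 1)) none
      match pvInnerA inner idx stack1 pset1 with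
      | (c_idx, stack2, pset2) =>
        ([PySem.List.pyGetD input_list c_idx 0], result_list ++ [stack2], pset2)

def generate_bitonic_sequence (input_list : List Int) : List (List Int) :=
  match (PySem.List.enumerate input_list 0).foldl (pvStepA input_list) ([], [], PySem.Set.empty) with
  | (stack, result_list, _) =>
    if stack ≠ [] ∧ ¬ stack ∈ result_list then result_list ++ [stack] else result_list

-- ===== PORT B =====
-- body of B's stage-1 'for i in range(1, n)' scan: state = (ends, descending)
def pvStepB (input_list : List Int) : List Int × Bool → Int → List Int × Bool
  | (ends, descending), i =>
    if descending then
      if PySem.List.pyGetD input_list (i - 1) 0 < PySem.List.pyGetD input_list i 0 then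
        (ends ++ [i - 1], false)
      else (ends, descending)
    else if PySem.List.pyGetD input_list i 0 < PySem.List.pyGetD input_list (i - 1) 0 then
      (ends, true)
    else (ends, descending)

def generate_bitonic_sequence_alt (input_list : List Int) : List (List Int) :=
  if input_list.length = 0 then []
  else
    let st := (PySem.List.pyRange 1 (input_list.length : Int) 1).foldl (pvStepB input_list) ([], true)
    let ends := if st.2 then st.1 ++ [(input_list.length : Int) - 1] else st.1
    let segments := (List.zip ((0 : Int) :: ends) ends).map
      (fun p => PySem.List.slice input_list (some p.1) (some (p.2 + 1)))
    let tail := if st.2 then [PySem.List.pyGetD input_list ((input_list.length : Int) - 1) 0]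
      else PySem.List.slice input_list (some (PySem.List.pyGetD ends (-1) 0)) none
    if tail ∈ segments then segments else segments ++ [tail]

-- ===== PRECONDITION & SPEC =====
def Spec_generate_bitonic_sequence (input_list : List Int) (out : List (List Int)) : Prop := out = generate_bitonic_sequence_alt input_list
instance (input_list : List Int) (out : List (List Int)) : Decidable (Spec_generate_bitonic_sequence input_list out) := by unfold Spec_generate_bitonic_sequence; infer_instance

-- ===== CLAIM (what is proved, stated in full; the proofs are below) =====
def Claim_equal_generate_bitonic_sequence : Prop := ∀ (input_list : List Int), Dom_generate_bitonic_sequence input_list → Spec_generate_bitonic_sequence input_list (generate_bitonic_sequence input_list)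

-- ===== LEMMAS AND PROOFS =====

-- A's final 'if stack and stack not in result_list' step, as a function of (stack, result)
def pvFinishA (p : List Int × List (List Int)) : List (List Int) :=
  if p.1 ≠ [] ∧ ¬ p.1 ∈ p.2 then p.2 ++ [p.1] else p.2

-- consume a maximal non-increasing run: (run, remaining suffix)
def pvDecRun : List Int → Int → List Int × List Int
  | [], _ => ([], [])
  | x :: xs, last =>
    if x ≤ last then
      let p := pvDecRun xs x
      (x :: p.1, p.2)
    else ([], x :: xs)

theorem pvDecRun_snd_length_le (xs : List Int) (v : Int) : (pvDecRun xs v).2.length ≤ xs.length := by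
  induction xs generalizing v with
  | nil => simp [pvDecRun]
  | cons x t ih =>
    simp only [pvDecRun]
    split
    · exact Nat.le_succ_of_le (ih x)
    · simp

theorem pvDecRun_append (xs : List Int) (v : Int) : (pvDecRun xs v).1 ++ (pvDecRun xs v).2 = xs := by
  induction xs generalizing v with
  | nil => simp [pvDecRun]
  | cons x t ih =>
    simp only [pvDecRun]
    split
    · simpa using ih x
    · simp

-- structural form of A's whole loop (proof-side bridge between the two ports)
def pvLoopB : List Int → List Int → List (List Int) → List Int × List (List Int)
  | [], tail, result => (tail, result)
  | r :: rest, tail, result =>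
    if tail ≠ [] ∧ tail.getLastD 0 ≤ r then pvLoopB rest (tail ++ [r]) result
    else
      let p := pvDecRun rest r
      pvLoopB p.2 [p.1.getLastD r] (result ++ [(tail ++ [r]) ++ p.1])
  termination_by rest _ _ => rest.length
  decreasing_by
  · simp
  · have := pvDecRun_snd_length_le rest r
    simp; omega

theorem pvLoopB_nil (tail : List Int) (result : List (List Int)) :
    pvLoopB [] tail result = (tail, result) := by rw [pvLoopB]

-- structural form of B's stage-1 scan (prev value, next index, suffix, flag, recorded ends)
def pvEnds : Int → Nat → List Int → Bool → List Int → List Int × Bool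
  | _, _, [], desc, ends => (ends, desc)
  | prev, i, x :: rest, desc, ends =>
    if desc then
      if prev < x then pvEnds x (i + 1) rest false (ends ++ [(i : Int) - 1])
      else pvEnds x (i + 1) rest true ends
    else
      if x < prev then pvEnds x (i + 1) rest true ends
      else pvEnds x (i + 1) rest false ends

-- B's stage 2 (segment materialisation) as functions of the scan result
def pvSegs (xs : List Int) (ends : List Int) : List (List Int) :=
  (List.zip ((0 : Int) :: ends) ends).map
    (fun p => PySem.List.slice xs (some p.1) (some (p.2 + 1)))

def pvFinishB (xs : List Int) (st : List Int × Bool) : List (List Int) :=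
  let ends := if st.2 then st.1 ++ [(xs.length : Int) - 1] else st.1
  let segments := pvSegs xs ends
  let tail := if st.2 then [PySem.List.pyGetD xs ((xs.length : Int) - 1) 0]
    else PySem.List.slice xs (some (PySem.List.pyGetD ends (-1) 0)) none
  if tail ∈ segments then segments else segments ++ [tail]

theorem pvAlt_eq (xs : List Int) : generate_bitonic_sequence_alt xs =
    if xs.length = 0 then []
    else pvFinishB xs ((PySem.List.pyRange 1 (xs.length : Int) 1).foldl (pvStepB xs) ([], true)) := rfl

-- ===== A-side lemmas (fold over enumerate = pvLoopB) =====

def pvAddRange (pset : PySem.Set Int) (c : Int) : Nat → PySem.Set Int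
  | 0 => pset
  | k + 1 => pvAddRange (PySem.Set.add pset (c + 1)) (c + 1) k

theorem mem_pvAddRange (k : Nat) : ∀ (pset : PySem.Set Int) (c j : Int),
    j ∈ pvAddRange pset c k ↔ j ∈ pset ∨ (c + 1 ≤ j ∧ j ≤ c + k) := by
  induction k with
  | zero =>
    intro pset c j
    simp only [pvAddRange, Nat.cast_zero, add_zero]
    constructor
    · exact Or.inl
    · rintro (h | ⟨h1, h2⟩)
      · exact h
      · omega
  | succ k ih =>
    intro pset c j
    rw [pvAddRange, ih, PySem.Set.mem_add]
    push_cast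
    constructor
    · rintro ((h | h) | h)
      · exact Or.inl h
      · right; omega
      · right; omega
    · rintro (h | h)
      · exact Or.inl (Or.inl h)
      · by_cases hj : j = c + 1
        · exact Or.inl (Or.inr hj)
        · right; omega

theorem pvGetLastD_concat (l : List Int) (a d : Int) : (l ++ [a]).getLastD d = a := by
  simp [List.getLastD_eq_getLast?]

theorem pvInnerA_eq (rest : List Int) : ∀ (c : Int) (stack : List Int) (pset : PySem.Set Int),
    stack ≠ [] →
    pvInnerA rest c stack pset =
      (c + (pvDecRun rest (stack.getLastD 0)).1.length,
       stack ++ (pvDecRun rest (stack.getLastD 0)).1,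
       pvAddRange pset c (pvDecRun rest (stack.getLastD 0)).1.length) := by
  induction rest with
  | nil => intro c stack pset _; simp [pvInnerA, pvDecRun, pvAddRange]
  | cons x t ih =>
    intro c stack pset hs
    simp only [pvInnerA, pvDecRun]
    split
    · rw [ih (c + 1) (stack ++ [x]) (PySem.Set.add pset (c + 1)) (by simp),
        pvGetLastD_concat]
      refine congrArg₂ _ ?_ (congrArg₂ _ ?_ ?_)
      · simp only [List.length_cons]; push_cast; ring
      · simp
      · rfl
    · simp [pvAddRange]

theorem pvFoldl_skipA (xs : List Int) (l : List (Int × Int)) :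
    ∀ (st : List Int × List (List Int) × PySem.Set Int),
    (∀ p ∈ l, PySem.Set.contains st.2.2 p.1 = true) → l.foldl (pvStepA xs) st = st := by
  induction l with
  | nil => intro st _; rfl
  | cons p t ih =>
    rintro ⟨stack, result, pset⟩ h
    have hp : PySem.Set.contains pset p.1 = true := h p (by simp)
    simp only [List.foldl_cons]
    have hstep : pvStepA xs (stack, result, pset) p = (stack, result, pset) := by
      obtain ⟨idx, cur⟩ := p
      simp only [pvStepA]
      rw [if_pos hp]
    rw [hstep]
    exact ih _ (fun q hq => h q (by simp [hq]))

theorem pvGetElem_cons_length (cons : List Int) (r : Int) : (r :: cons)[cons.length] = cons.getLastD r := by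
  have h1 : (r :: cons).getLastD 0 = cons.getLastD r := List.getLastD_cons
  rw [← h1, List.getLastD_eq_getLast?, List.getLast?_eq_getElem?]
  simp

-- input_list[c_idx] at the end of A's inner loop is the last consumed element
theorem pvLastElem (xs : List Int) (m : Nat) (r : Int) (cons rem : List Int)
    (hdrop : xs.drop m = (r :: cons) ++ rem) :
    PySem.List.pyGetD xs ((m : Int) + (cons.length : Int)) 0 = cons.getLastD r := by
  have hm : m < xs.length := by
    by_contra h
    rw [List.drop_eq_nil_iff.mpr (by omega)] at hdrop
    exact absurd hdrop (by simp)
  have hsplit : xs = xs.take m ++ ((r :: cons) ++ rem) := by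
    rw [← hdrop, List.take_append_drop]
  have hlen : (xs.take m).length = m := by simp; omega
  have hcast : (m : Int) + (cons.length : Int) = ((m + cons.length : Nat) : Int) := by push_cast; ring
  rw [hcast, PySem.List.pyGetD_natCast]
  rw [List.getD_eq_getElem?_getD]
  conv_lhs => rw [hsplit]
  rw [List.getElem?_append_right (by omega)]
  have : m + cons.length - (xs.take m).length = cons.length := by omega
  rw [this]
  rw [List.getElem?_append_left (by simp)]
  rw [List.getElem?_eq_getElem (by simp)]
  rw [pvGetElem_cons_length]
  rfl

theorem pvContains_false_of_lt (pset : PySem.Set Int) (i : Int)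
    (h : ∀ j ∈ pset, j < i) : PySem.Set.contains pset i = false := by
  cases hc : PySem.Set.contains pset i with
  | false => rfl
  | true =>
    have := h i ((PySem.Set.contains_iff _ _).mp hc)
    omega

theorem pvLoop_eq (xs : List Int) (n : Nat) : ∀ (rest : List Int) (m : Nat)
    (stack : List Int) (result : List (List Int)) (pset : PySem.Set Int),
    rest.length ≤ n → xs.drop m = rest → (∀ j ∈ pset, j < (m : Int)) →
    ∃ pset', (PySem.List.enumerate rest (m : Int)).foldl (pvStepA xs) (stack, result, pset)
      = ((pvLoopB rest stack result).1, (pvLoopB rest stack result).2, pset') := by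
  induction n with
  | zero =>
    intro rest m stack result pset hn hdrop _
    have : rest = [] := List.eq_nil_of_length_eq_zero (by omega)
    subst this
    exact ⟨pset, by simp [PySem.List.enumerate_nil, pvLoopB]⟩
  | succ n ih =>
    intro rest m stack result pset hn hdrop hinv
    cases rest with
    | nil => exact ⟨pset, by simp [PySem.List.enumerate_nil, pvLoopB]⟩
    | cons r rest' =>
      rw [PySem.List.enumerate_cons, List.foldl_cons]
      have hdrop' : xs.drop (m + 1) = rest' := by
        rw [← List.drop_drop]
        rw [hdrop]; rfl
      have hc : PySem.Set.contains pset (m : Int) = false := pvContains_false_of_lt pset _ hinv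
      have hm' : ((m : Int)) ∉ pset := fun h => absurd (hinv _ h) (lt_irrefl _)
      by_cases hcond : stack ≠ [] ∧ stack.getLastD 0 ≤ r
      · -- increasing branch
        have hstep : pvStepA xs (stack, result, pset) ((m : Int), r)
            = (stack ++ [r], result, PySem.Set.add pset (m : Int)) := by
          simp only [pvStepA]
          rw [if_neg (by simp; exact hm'), if_pos hcond]
        rw [hstep]
        have hinv' : ∀ j ∈ PySem.Set.add pset (m : Int), j < ((m + 1 : Nat) : Int) := by
          intro j hj
          rw [PySem.Set.mem_add] at hj
          rcases hj with h | h
          · have := hinv j h; push_cast; omega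
          · push_cast; omega
        have hcast : (m : Int) + 1 = ((m + 1 : Nat) : Int) := by push_cast; ring
        rw [hcast]
        obtain ⟨pset', hfold⟩ := ih rest' (m + 1) (stack ++ [r]) result
          (PySem.Set.add pset (m : Int)) (by simpa using hn) hdrop' hinv'
        refine ⟨pset', ?_⟩
        rw [hfold]
        have : pvLoopB (r :: rest') stack result = pvLoopB rest' (stack ++ [r]) result := by
          rw [pvLoopB]; rw [if_pos hcond]
        rw [this]
      · -- else branch: consume the decreasing run
        set p := pvDecRun rest' r with hp
        have hsplit : rest' = p.1 ++ p.2 := (pvDecRun_append rest' r).symm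
        have hslice : PySem.List.slice xs (some ((m : Int) + 1)) none = rest' := by
          have : (m : Int) + 1 = ((m + 1 : Nat) : Int) := by push_cast; ring
          rw [this, PySem.List.slice_from_natCast, hdrop']
        have hlast1 : (stack ++ [r]).getLastD 0 = r := pvGetLastD_concat _ _ _
        have hinner := pvInnerA_eq rest' (m : Int) (stack ++ [r])
          (PySem.Set.add pset (m : Int)) (by simp)
        rw [hlast1] at hinner
        have hlastel : PySem.List.pyGetD xs ((m : Int) + (p.1.length : Int)) 0 = p.1.getLastD r := by
          apply pvLastElem xs m r p.1 p.2
          rw [hdrop]; rw [hsplit]; simp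
        have hstep : pvStepA xs (stack, result, pset) ((m : Int), r)
            = ([p.1.getLastD r], result ++ [(stack ++ [r]) ++ p.1],
               pvAddRange (PySem.Set.add pset (m : Int)) (m : Int) p.1.length) := by
          simp only [pvStepA]
          rw [if_neg (by simp; exact hm'), if_neg hcond, hslice, hinner, hlastel]
        rw [hstep]
        rw [show rest' = p.1 ++ p.2 from hsplit, PySem.List.enumerate_append, List.foldl_append]
        set pset2 := pvAddRange (PySem.Set.add pset (m : Int)) (m : Int) p.1.length with hpset2
        have hskip : (PySem.List.enumerate p.1 ((m : Int) + 1)).foldl (pvStepA xs)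
            ([p.1.getLastD r], result ++ [(stack ++ [r]) ++ p.1], pset2)
            = ([p.1.getLastD r], result ++ [(stack ++ [r]) ++ p.1], pset2) := by
          apply pvFoldl_skipA
          intro q hq
          rw [PySem.List.mem_enumerate_iff] at hq
          obtain ⟨k, hk, hqe⟩ := hq
          subst hqe
          apply (PySem.Set.contains_iff _ _).mpr
          rw [hpset2, mem_pvAddRange]
          right
          constructor <;> push_cast <;> omega
        rw [hskip]
        have hdrop2 : xs.drop (m + 1 + p.1.length) = p.2 := by
          have h0 : xs.drop (m + 1 + p.1.length) = (xs.drop (m + 1)).drop p.1.length := by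
            rw [List.drop_drop]
          rw [h0, hdrop']
          conv_lhs => rw [hsplit]
          rw [List.drop_left]
        have hinv2 : ∀ j ∈ pset2, j < ((m + 1 + p.1.length : Nat) : Int) := by
          intro j hj
          rw [hpset2, mem_pvAddRange] at hj
          rcases hj with hj | hj
          · rw [PySem.Set.mem_add] at hj
            rcases hj with h | h
            · have := hinv j h; push_cast; omega
            · push_cast; omega
          · push_cast at hj ⊢; omega
        have hcast : (m : Int) + 1 + (p.1.length : Int) = ((m + 1 + p.1.length : Nat) : Int) := by
          push_cast; ring
        rw [hcast]
        obtain ⟨pset', hfold⟩ := ih p.2 (m + 1 + p.1.length) [p.1.getLastD r]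
          (result ++ [(stack ++ [r]) ++ p.1]) pset2
          (by
            have h1 : p.2.length ≤ rest'.length := pvDecRun_snd_length_le rest' r
            have h2 : (r :: rest').length ≤ n + 1 := hn
            simp at h2; omega)
          hdrop2 hinv2
        refine ⟨pset', ?_⟩
        rw [hfold]
        have hB : pvLoopB (r :: (p.1 ++ p.2)) stack result
            = pvLoopB p.2 [p.1.getLastD r] (result ++ [(stack ++ [r]) ++ p.1]) := by
          rw [pvLoopB]
          rw [if_neg hcond]
          rw [← hsplit, ← hp]
        rw [hB]

-- ===== B-side lemmas =====

-- where the run stops, the next element is strictly above the run's last value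
theorem pvDecRun_stop (rest : List Int) : ∀ (r x : Int) (z : List Int),
    pvDecRun rest r = ((pvDecRun rest r).1, x :: z) → (pvDecRun rest r).1.getLastD r < x := by
  induction rest with
  | nil => intro r x z h; simp [pvDecRun] at h
  | cons y t ih =>
    intro r x z h
    by_cases hy : y ≤ r
    · have he : pvDecRun (y :: t) r = (y :: (pvDecRun t y).1, (pvDecRun t y).2) := by
        simp [pvDecRun, hy]
      rw [he] at h ⊢
      simp only at h
      have h2 : (pvDecRun t y).2 = x :: z := congrArg Prod.snd h
      have := ih y x z (by rw [← h2])
      simp only [List.getLastD_cons]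
      exact this
    · have he : pvDecRun (y :: t) r = ([], y :: t) := by simp [pvDecRun, hy]
      rw [he] at h ⊢
      simp only at h ⊢
      have h2 : y :: t = x :: z := congrArg Prod.snd h
      have : y = x := (List.cons.injEq _ _ _ _ ▸ h2).1
      simp [List.getLastD]
      omega

-- getD from a drop equation
theorem pvGetD_of_drop (xs : List Int) (m : Nat) (x : Int) (rest : List Int)
    (h : xs.drop m = x :: rest) : xs.getD m 0 = x := by
  have h1 : xs[m]? = some x := by
    rw [← List.head?_drop, h]; rfl
  simp [List.getD_eq_getElem?_getD, h1]

theorem pvLt_of_drop (xs : List Int) (m : Nat) (x : Int) (rest : List Int)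
    (h : xs.drop m = x :: rest) : m < xs.length := by
  have := congrArg List.length h
  simp at this; omega

-- last of a segment slice
theorem pvTake_getLastD (xs : List Int) (s m : Nat) (hsm : s < m) (hm : m ≤ xs.length) :
    ((xs.drop s).take (m - s)).getLastD 0 = xs.getD (m - 1) 0 := by
  have hlen : ((xs.drop s).take (m - s)).length = m - s := by simp; omega
  rw [List.getLastD_eq_getLast?, List.getLast?_eq_getElem?, hlen]
  rw [List.getElem?_take, if_pos (by omega), List.getElem?_drop]
  have : s + (m - s - 1) = m - 1 := by omega
  rw [this, List.getD_eq_getElem?_getD]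

-- extending a segment slice by one element
theorem pvTake_extend (xs : List Int) (s m : Nat) (hsm : s ≤ m) (hm : m < xs.length) :
    (xs.drop s).take (m - s) ++ [xs.getD m 0] = (xs.drop s).take (m + 1 - s) := by
  have h1 : m + 1 - s = (m - s) + 1 := by omega
  rw [h1, List.take_add_one]
  congr 1
  rw [List.getElem?_drop]
  have : s + (m - s) = m := by omega
  rw [this, List.getElem?_eq_getElem hm]
  simp [List.getD_eq_getElem?_getD, List.getElem?_eq_getElem hm]

theorem pvDrop_decomp (xs : List Int) (s m : Nat) (hsm : s ≤ m) :
    (xs.drop s).take (m - s) ++ xs.drop m = xs.drop s := by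
  conv_rhs => rw [← List.take_append_drop (m - s) (xs.drop s)]
  rw [List.drop_drop]
  congr 2
  omega

theorem pvZip_concat (l : List Int) (e : Int) : ∀ (a : Int),
    List.zip (a :: (l ++ [e])) (l ++ [e]) = List.zip (a :: l) l ++ [((a :: l).getLastD 0, e)] := by
  induction l with
  | nil => intro a; rfl
  | cons b t ih =>
    intro a
    simp only [List.cons_append, List.zip_cons_cons, ih b, List.getLastD_cons]

theorem pvSegs_concat (xs : List Int) (ends : List Int) (e : Int) :
    pvSegs xs (ends ++ [e]) = pvSegs xs ends ++
      [PySem.List.slice xs (some ((0 :: ends).getLastD 0)) (some (e + 1))] := by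
  simp only [pvSegs, pvZip_concat, List.map_append, List.map_cons, List.map_nil]

-- B's stage-1 fold over range(1, n) is the structural scan pvEnds
theorem pvFold_eq_pvEnds (xs : List Int) : ∀ (rest : List Int) (m : Nat) (st : List Int × Bool),
    1 ≤ m → xs.drop m = rest →
    (PySem.List.pyRange (m : Int) (xs.length : Int) 1).foldl (pvStepB xs) st
      = pvEnds (xs.getD (m - 1) 0) m rest st.2 st.1 := by
  intro rest
  induction rest with
  | nil =>
    rintro m ⟨ends, desc⟩ hm1 hdrop
    have hle : xs.length ≤ m := by
      have := List.drop_eq_nil_iff.mp hdrop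
      omega
    rw [PySem.List.pyRange_one_eq_nil (by exact_mod_cast hle)]
    rfl
  | cons x rest' ih =>
    rintro m ⟨ends, desc⟩ hm1 hdrop
    have hm2 : m < xs.length := pvLt_of_drop _ _ _ _ hdrop
    have hx : xs.getD m 0 = x := pvGetD_of_drop _ _ _ _ hdrop
    have hdrop' : xs.drop (m + 1) = rest' := by
      rw [← List.drop_drop, hdrop]; rfl
    rw [PySem.List.pyRange_one_cons (by exact_mod_cast hm2), List.foldl_cons]
    have e2 : ((m : Int) - 1) = ((m - 1 : Nat) : Int) := by omega
    have e3 : (m : Int) + 1 = ((m + 1 : Nat) : Int) := by push_cast; ring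
    have eprev : PySem.List.pyGetD xs ((m : Int) - 1) 0 = xs.getD (m - 1) 0 := by
      rw [e2, PySem.List.pyGetD_natCast]
    have ecur : PySem.List.pyGetD xs (m : Int) 0 = x := by
      rw [PySem.List.pyGetD_natCast]; exact hx
    have hsucc : (m + 1) - 1 = m := by omega
    simp only [pvStepB, eprev, ecur, pvEnds]
    cases desc with
    | true =>
      simp only [if_true]
      by_cases hcmp : xs.getD (m - 1) 0 < x
      · rw [if_pos hcmp, if_pos hcmp, e3, ih (m + 1) (ends ++ [(m : Int) - 1], false) (by omega) hdrop', hsucc, hx]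
      · rw [if_neg hcmp, if_neg hcmp, e3, ih (m + 1) (ends, true) (by omega) hdrop', hsucc, hx]
    | false =>
      simp only [Bool.false_eq_true, if_false]
      by_cases hcmp : x < xs.getD (m - 1) 0
      · rw [if_pos hcmp, if_pos hcmp, e3, ih (m + 1) (ends, true) (by omega) hdrop', hsucc, hx]
      · rw [if_neg hcmp, if_neg hcmp, e3, ih (m + 1) (ends, false) (by omega) hdrop', hsucc, hx]

-- pvEnds in descending mode consumes exactly a pvDecRun
theorem pvEnds_desc (rest : List Int) : ∀ (r : Int) (i : Nat) (ends : List Int),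
    pvEnds r i rest true ends =
      (match pvDecRun rest r with
       | (_, []) => (ends, true)
       | (w, x :: z) => pvEnds x (i + w.length + 1) z false (ends ++ [((i : Int) + (w.length : Int)) - 1])) := by
  induction rest with
  | nil => intro r i ends; rfl
  | cons y t ih =>
    intro r i ends
    rcases hq : pvDecRun t y with ⟨w, p⟩
    by_cases hy : y ≤ r
    · have hd : pvDecRun (y :: t) r = (y :: w, p) := by simp [pvDecRun, hy, hq]
      rw [hd]
      have hL : pvEnds r i (y :: t) true ends = pvEnds y (i + 1) t true ends := by
        simp [pvEnds, not_lt.mpr hy]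
      rw [hL, ih y (i + 1) ends, hq]
      cases p with
      | nil => rfl
      | cons x z =>
        simp only [List.length_cons]
        have e1 : i + 1 + w.length + 1 = i + (w.length + 1) + 1 := by omega
        have e2 : ((i + 1 : Nat) : Int) + (w.length : Int) - 1
            = (i : Int) + ((w.length + 1 : Nat) : Int) - 1 := by push_cast; ring
        rw [e1, e2]
    · have hd : pvDecRun (y :: t) r = ([], y :: t) := by simp [pvDecRun, hy]
      rw [hd]
      have hL : pvEnds r i (y :: t) true ends = pvEnds y (i + 1) t false (ends ++ [(i : Int) - 1]) := by
        simp [pvEnds, not_le.mp hy]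
      rw [hL]
      simp only [List.length_nil]
      norm_num

-- MAIN base case: empty suffix in ascending mode
theorem pvMainBase (xs : List Int) (m s₀ : Nat) (ends : List Int)
    (hdrop : xs.drop m = []) (hmlen : m ≤ xs.length) (hs₀ : s₀ < m)
    (hne : ends ≠ []) (hlast : ends.getLastD 0 = (s₀ : Int)) :
    pvFinishA (pvLoopB [] ((xs.drop s₀).take (m - s₀)) (pvSegs xs ends))
      = pvFinishB xs (pvEnds (xs.getD (m - 1) 0) m [] false ends) := by
  have hm : m = xs.length := by
    have := List.drop_eq_nil_iff.mp hdrop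
    omega
  subst hm
  have hs₀len : s₀ < xs.length := hs₀
  have htail : (xs.drop s₀).take (xs.length - s₀) = xs.drop s₀ :=
    List.take_of_length_le (by simp)
  have htailB : PySem.List.pyGetD ends (-1) 0 = (s₀ : Int) := by
    rw [PySem.List.pyGetD_neg_one ends 0 hne, ← hlast, List.getLastD_eq_getLast?,
      List.getLast?_eq_some_getLast hne]
    rfl
  have hdropne : xs.drop s₀ ≠ [] := by
    intro h
    have := List.drop_eq_nil_iff.mp h
    omega
  rw [pvLoopB_nil, htail]
  show _ = pvFinishB xs (ends, false)
  simp only [pvFinishB, Bool.false_eq_true, if_false]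
  rw [htailB]
  rw [show ((s₀ : Int)) = ((s₀ : Nat) : Int) from rfl, PySem.List.slice_from_natCast]
  simp only [pvFinishA]
  by_cases hmem : xs.drop s₀ ∈ pvSegs xs ends
  · rw [if_neg (fun h => h.2 hmem), if_pos hmem]
  · rw [if_pos ⟨hdropne, hmem⟩, if_neg hmem]

-- ELSE base case: the decreasing run swallows the whole remaining suffix
theorem pvElseNil (xs : List Int) (rest : List Int) (m s₀ : Nat) (ends w : List Int)
    (hq : pvDecRun rest (xs.getD (m - 1) 0) = (w, []))
    (hdrop : xs.drop m = rest) (hmlen : m ≤ xs.length) (hs₀ : s₀ < m)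
    (hlast : (0 :: ends).getLastD 0 = (s₀ : Int)) :
    pvFinishA (pvLoopB ([] : List Int)
        [w.getLastD (xs.getD (m - 1) 0)]
        (pvSegs xs ends ++ [(xs.drop s₀).take (m - s₀) ++ w]))
      = pvFinishB xs (pvEnds (xs.getD (m - 1) 0) m rest true ends) := by
  set r := xs.getD (m - 1) 0 with hr
  have hm1 : 1 ≤ m := by omega
  have hwrest : w = rest := by
    have := pvDecRun_append rest r
    rw [hq] at this
    simpa using this
  subst hwrest
  have hmlt : m - 1 < xs.length := by omega
  have hdropm1 : xs.drop (m - 1) = r :: w := by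
    rw [List.drop_eq_getElem_cons hmlt]
    congr 1
    · rw [hr, List.getD_eq_getElem]
    · rw [show m - 1 + 1 = m by omega, hdrop]
  have hwlen : w.length = xs.length - m := by
    have := congrArg List.length hdrop
    simp at this
    omega
  have hlen1 : 1 ≤ xs.length := by omega
  have hv : xs.getD (xs.length - 1) 0 = w.getLastD r := by
    rw [List.getD_eq_getElem?_getD,
      show xs.length - 1 = (m - 1) + w.length by omega, ← List.getElem?_drop, hdropm1,
      List.getElem?_eq_getElem (by simp), pvGetElem_cons_length]
    rfl
  -- right-hand side
  rw [pvEnds_desc, hq]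
  simp only
  show _ = pvFinishB xs (ends, true)
  simp only [pvFinishB, if_true]
  have hcast1 : ((xs.length : Int) - 1) = ((xs.length - 1 : Nat) : Int) := by omega
  have htailB : PySem.List.pyGetD xs ((xs.length : Int) - 1) 0 = w.getLastD r := by
    rw [hcast1, PySem.List.pyGetD_natCast, hv]
  rw [htailB]
  rw [pvSegs_concat, hlast]
  have hslice : PySem.List.slice xs (some ((s₀ : Int))) (some ((xs.length : Int) - 1 + 1))
      = (xs.drop s₀).take (m - s₀) ++ w := by
    rw [show ((xs.length : Int) - 1 + 1) = ((xs.length : Nat) : Int) by omega,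
      PySem.List.slice_natCast]
    rw [show (xs.drop s₀).take (xs.length - s₀) = xs.drop s₀ from List.take_of_length_le (by simp)]
    conv_lhs => rw [← pvDrop_decomp xs s₀ m (by omega)]
    rw [hdrop]
  rw [hslice]
  -- both sides
  set segs := pvSegs xs ends ++ [(xs.drop s₀).take (m - s₀) ++ w] with hsegs
  rw [pvLoopB_nil]
  simp only [pvFinishA]
  by_cases hmem : [w.getLastD r] ∈ segs
  · rw [if_neg (fun h => h.2 hmem), if_pos hmem]
  · rw [if_pos ⟨by simp, hmem⟩, if_neg hmem]

-- the central correspondence: A's structural loop vs B's scan-then-slice, in both modes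
theorem pvMainElse (xs : List Int) : ∀ (N : Nat),
    (∀ (rest : List Int) (m s₀ : Nat) (ends : List Int),
      rest.length ≤ N → xs.drop m = rest → m ≤ xs.length → s₀ < m →
      ends ≠ [] → ends.getLastD 0 = (s₀ : Int) →
      pvFinishA (pvLoopB rest ((xs.drop s₀).take (m - s₀)) (pvSegs xs ends))
        = pvFinishB xs (pvEnds (xs.getD (m - 1) 0) m rest false ends))
    ∧
    (∀ (rest : List Int) (m s₀ : Nat) (ends : List Int),
      rest.length ≤ N → xs.drop m = rest → m ≤ xs.length → s₀ < m →
      (0 :: ends).getLastD 0 = (s₀ : Int) →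
      pvFinishA (pvLoopB (pvDecRun rest (xs.getD (m - 1) 0)).2
          [(pvDecRun rest (xs.getD (m - 1) 0)).1.getLastD (xs.getD (m - 1) 0)]
          (pvSegs xs ends ++ [(xs.drop s₀).take (m - s₀) ++ (pvDecRun rest (xs.getD (m - 1) 0)).1]))
        = pvFinishB xs (pvEnds (xs.getD (m - 1) 0) m rest true ends)) := by
  intro N
  induction N with
  | zero =>
    constructor
    · intro rest m s₀ ends hN hdrop hmlen hs₀ hne hlast
      have : rest = [] := List.eq_nil_of_length_eq_zero (by omega)
      subst this
      exact pvMainBase xs m s₀ ends hdrop hmlen hs₀ hne hlast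
    · intro rest m s₀ ends hN hdrop hmlen hs₀ hlast
      have : rest = [] := List.eq_nil_of_length_eq_zero (by omega)
      subst this
      exact pvElseNil xs [] m s₀ ends [] rfl hdrop hmlen hs₀ hlast
  | succ N ih =>
    constructor
    · -- MAIN
      intro rest m s₀ ends hN hdrop hmlen hs₀ hne hlast
      cases rest with
      | nil => exact pvMainBase xs m s₀ ends hdrop hmlen hs₀ hne hlast
      | cons x rest' =>
        have hm1 : 1 ≤ m := by omega
        have hmlt : m < xs.length := pvLt_of_drop _ _ _ _ hdrop
        have hx : xs.getD m 0 = x := pvGetD_of_drop _ _ _ _ hdrop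
        have hdrop' : xs.drop (m + 1) = rest' := by
          rw [← List.drop_drop, hdrop]; rfl
        have htlen : ((xs.drop s₀).take (m - s₀)).length = m - s₀ := by simp; omega
        have htne : (xs.drop s₀).take (m - s₀) ≠ [] := by
          intro h; rw [h] at htlen; simp at htlen; omega
        have htlast : ((xs.drop s₀).take (m - s₀)).getLastD 0 = xs.getD (m - 1) 0 :=
          pvTake_getLastD xs s₀ m hs₀ (by omega)
        by_cases hle : xs.getD (m - 1) 0 ≤ x
        · -- ascending step
          have hstep : pvLoopB (x :: rest') ((xs.drop s₀).take (m - s₀)) (pvSegs xs ends)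
              = pvLoopB rest' ((xs.drop s₀).take (m - s₀) ++ [x]) (pvSegs xs ends) := by
            rw [pvLoopB, if_pos ⟨htne, by rw [htlast]; exact hle⟩]
          have hext : (xs.drop s₀).take (m - s₀) ++ [x] = (xs.drop s₀).take (m + 1 - s₀) := by
            rw [← hx]; exact pvTake_extend xs s₀ m (by omega) hmlt
          have hR : pvEnds (xs.getD (m - 1) 0) m (x :: rest') false ends
              = pvEnds x (m + 1) rest' false ends := by
            simp only [pvEnds, Bool.false_eq_true, if_false, if_neg (not_lt.mpr hle)]
          rw [hstep, hext, hR]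
          have := ih.1 rest' (m + 1) s₀ ends (by simpa using hN) hdrop' (by omega) (by omega) hne hlast
          rw [show m + 1 - 1 = m by omega, hx] at this
          exact this
        · -- descent begins
          have hlt : x < xs.getD (m - 1) 0 := by omega
          have hstep : pvLoopB (x :: rest') ((xs.drop s₀).take (m - s₀)) (pvSegs xs ends)
              = pvLoopB (pvDecRun rest' x).2 [(pvDecRun rest' x).1.getLastD x]
                  (pvSegs xs ends ++ [((xs.drop s₀).take (m - s₀) ++ [x]) ++ (pvDecRun rest' x).1]) := by
            rw [pvLoopB, if_neg (by rw [htlast]; intro h; exact absurd h.2 (by omega))]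
          have hext : (xs.drop s₀).take (m - s₀) ++ [x] = (xs.drop s₀).take (m + 1 - s₀) := by
            rw [← hx]; exact pvTake_extend xs s₀ m (by omega) hmlt
          have hR : pvEnds (xs.getD (m - 1) 0) m (x :: rest') false ends
              = pvEnds x (m + 1) rest' true ends := by
            simp only [pvEnds, Bool.false_eq_true, if_false, if_pos hlt]
          rw [hstep, hext, hR]
          have := ih.2 rest' (m + 1) s₀ ends (by simpa using hN) hdrop' (by omega) (by omega)
            (by rw [List.getLastD_cons]; rw [List.getLastD_eq_getLast?] at hlast ⊢
                cases ends with
                | nil => exact absurd rfl hne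
                | cons a l => exact hlast)
          rw [show m + 1 - 1 = m by omega, hx] at this
          exact this
    · -- ELSE
      intro rest m s₀ ends hN hdrop hmlen hs₀ hlast
      set r := xs.getD (m - 1) 0 with hr
      rcases hq : pvDecRun rest r with ⟨w, p2⟩
      cases p2 with
      | nil =>
        exact pvElseNil xs rest m s₀ ends w hq hdrop hmlen hs₀ hlast
      | cons x z =>
        have hm1 : 1 ≤ m := by omega
        have hwz : w ++ x :: z = rest := by
          have := pvDecRun_append rest r
          rw [hq] at this
          simpa using this
        have hmlt : m - 1 < xs.length := by
          have : m < xs.length ∨ rest = [] := by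
            rcases Nat.lt_or_ge m xs.length with h | h
            · exact Or.inl h
            · exact Or.inr (by rw [← hdrop, List.drop_eq_nil_iff.mpr (by omega)])
          rcases this with h | h
          · omega
          · rw [← hwz] at h; simp at h
        have hdropm1 : xs.drop (m - 1) = r :: rest := by
          rw [List.drop_eq_getElem_cons hmlt]
          congr 1
          · rw [hr, List.getD_eq_getElem]
          · rw [show m - 1 + 1 = m by omega, hdrop]
        set e := m - 1 + w.length with he
        have hlendrop : xs.length - (m - 1) = w.length + z.length + 2 := by
          have h1 := congrArg List.length hdropm1
          rw [← hwz] at h1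
          simp at h1
          omega
        have helt : e + 1 < xs.length := by omega
        have hdrope1 : xs.drop (e + 1) = x :: z := by
          have h1 : xs.drop ((m - 1) + (w.length + 1)) = x :: z := by
            rw [← List.drop_drop, hdropm1,
              show r :: rest = (r :: w) ++ (x :: z) by rw [← hwz]; rfl,
              show w.length + 1 = (r :: w).length from rfl, List.drop_left]
          rw [show e + 1 = (m - 1) + (w.length + 1) by omega]
          exact h1
        have hdrope2 : xs.drop (e + 2) = z := by
          have h1 : xs.drop ((e + 1) + 1) = z := by
            rw [← List.drop_drop, hdrope1]
            rfl
          exact h1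
        have hxe1 : xs.getD (e + 1) 0 = x := pvGetD_of_drop _ _ _ _ hdrope1
        have hv : xs.getD e 0 = w.getLastD r := by
          rw [List.getD_eq_getElem?_getD, show e = (m - 1) + w.length by omega,
            ← List.getElem?_drop, hdropm1,
            show r :: rest = (r :: w) ++ (x :: z) by rw [← hwz]; rfl,
            List.getElem?_append_left (by simp),
            List.getElem?_eq_getElem (by simp), pvGetElem_cons_length]
          rfl
        have hvx : w.getLastD r < x := by
          have h := pvDecRun_stop rest r x z
          rw [hq] at h
          simpa using h rfl
        -- rewrite goal
        show pvFinishA (pvLoopB (x :: z) [w.getLastD r]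
            (pvSegs xs ends ++ [(xs.drop s₀).take (m - s₀) ++ w]))
          = pvFinishB xs (pvEnds r m rest true ends)
        rw [pvEnds_desc, hq]
        show pvFinishA (pvLoopB (x :: z) [w.getLastD r]
            (pvSegs xs ends ++ [(xs.drop s₀).take (m - s₀) ++ w]))
          = pvFinishB xs (pvEnds x (m + w.length + 1) z false
              (ends ++ [((m : Int) + (w.length : Int)) - 1]))
        have hstep : pvLoopB (x :: z) [w.getLastD r]
            (pvSegs xs ends ++ [(xs.drop s₀).take (m - s₀) ++ w])
            = pvLoopB z [w.getLastD r, x]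
                (pvSegs xs ends ++ [(xs.drop s₀).take (m - s₀) ++ w]) := by
          rw [pvLoopB,
            if_pos ⟨by simp, (show ([w.getLastD r] : List Int).getLastD 0 ≤ x from le_of_lt hvx)⟩]
          rfl
        rw [hstep]
        have hdrope : xs.drop e = w.getLastD r :: x :: z := by
          rw [List.drop_eq_getElem_cons (show e < xs.length by omega), hdrope1, ← hv,
            List.getD_eq_getElem]
        have ht2 : (xs.drop e).take ((e + 2) - e) = [w.getLastD r, x] := by
          rw [hdrope, show (e + 2) - e = 2 by omega]
          rfl
        have hTlen : ((xs.drop s₀).take (m - s₀)).length = m - s₀ := by simp; omega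
        have hseg : pvSegs xs (ends ++ [(e : Int)])
            = pvSegs xs ends ++ [(xs.drop s₀).take (m - s₀) ++ w] := by
          rw [pvSegs_concat, hlast]
          congr 2
          rw [show ((e : Int) + 1) = ((e + 1 : Nat) : Int) by push_cast; ring,
            PySem.List.slice_natCast]
          have hd : xs.drop s₀ = (xs.drop s₀).take (m - s₀) ++ (w ++ (x :: z)) := by
            conv_lhs => rw [← pvDrop_decomp xs s₀ m (by omega)]
            rw [hdrop, hwz]
          conv_lhs => rw [hd]
          rw [show e + 1 - s₀ = ((xs.drop s₀).take (m - s₀)).length + w.length by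
              rw [hTlen]; omega,
            List.take_length_add_append, List.take_left]
        have hcast : ((m : Int) + (w.length : Int)) - 1 = ((e : Nat) : Int) := by omega
        rw [hcast, show m + w.length + 1 = e + 2 by omega]
        have := ih.1 z (e + 2) e (ends ++ [(e : Int)])
          (by have := congrArg List.length hwz; simp at this; omega)
          hdrope2 (by omega) (by omega) (by simp) List.getLastD_concat
        rw [show e + 2 - 1 = e + 1 by omega, hxe1, ht2, hseg] at this
        exact this


-- ===== VERDICT (by name: the statement is the Claim_ definition above) =====
theorem generate_bitonic_sequence_spec : Claim_equal_generate_bitonic_sequence := by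
  intro input_list _
  unfold Spec_generate_bitonic_sequence
  cases input_list with
  | nil => decide
  | cons x0 xs' =>
    have hne : (x0 :: xs').length ≠ 0 := by simp
    obtain ⟨pset', h⟩ := pvLoop_eq (x0 :: xs') (x0 :: xs').length (x0 :: xs') 0 [] []
      PySem.Set.empty (le_refl _) rfl (by intro j hj; simp [PySem.Set.empty] at hj)
    have hA : generate_bitonic_sequence (x0 :: xs') = pvFinishA (pvLoopB (x0 :: xs') [] []) := by
      unfold generate_bitonic_sequence
      rw [show ((0 : Nat) : Int) = (0 : Int) from rfl] at h
      rw [h]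
      rfl
    have hstep0 : pvLoopB (x0 :: xs') [] []
        = pvLoopB (pvDecRun xs' x0).2 [(pvDecRun xs' x0).1.getLastD x0]
            [([] ++ [x0]) ++ (pvDecRun xs' x0).1] := by
      rw [pvLoopB, if_neg (by simp)]
      rfl
    have hELSE := (pvMainElse (x0 :: xs') xs'.length).2 xs' 1 0 []
      (le_refl _) rfl (by simp) (by omega) (by simp)
    have hBfold : (PySem.List.pyRange 1 (((x0 :: xs').length : Nat) : Int) 1).foldl
        (pvStepB (x0 :: xs')) ([], true) = pvEnds ((x0 :: xs').getD 0 0) 1 xs' true [] :=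
      pvFold_eq_pvEnds (x0 :: xs') xs' 1 ([], true) (le_refl _) rfl
    rw [hA, hstep0, pvAlt_eq, if_neg hne, hBfold]
    exact hELSE
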